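-- pv_equiv track=rewrite | github.com/HadrielWonda/f1-calendar | f1-calendar.py | checkFourRaceInRow
-- ===== SOURCE A (Python) =====
-- def checkFourRaceInRow(weekends):
--     consecutive_count = 1
--
--     for i in range(1, len(weekends)):
--         if weekends[i] - weekends[i - 1] == 1:
--             consecutive_count += 1
--         else:
--             consecutive_count = 1
--
--         if consecutive_count == 4:
--             return True
--
--     return False
-- ===== SOURCE B (Python) =====
-- def checkFourRaceInRow(weekends):
--     for i in range(len(weekends) - 3):
--         if (weekends[i + 1] - weekends[i] == 1
--                 and weekends[i + 2] - weekends[i + 1] == 1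
--                 and weekends[i + 3] - weekends[i + 2] == 1):
--             return True
--     return False
-- ===== Notes on version B (the rewrite author's own statement) =====
-- stated objective: alternative
-- what changed: Replaces the running consecutive-count accumulator (incremented/reset across one pass) with a sliding window that directly tests the three adjacent differences of each length-4 block and returns True on the first hit.
import Mathlib
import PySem

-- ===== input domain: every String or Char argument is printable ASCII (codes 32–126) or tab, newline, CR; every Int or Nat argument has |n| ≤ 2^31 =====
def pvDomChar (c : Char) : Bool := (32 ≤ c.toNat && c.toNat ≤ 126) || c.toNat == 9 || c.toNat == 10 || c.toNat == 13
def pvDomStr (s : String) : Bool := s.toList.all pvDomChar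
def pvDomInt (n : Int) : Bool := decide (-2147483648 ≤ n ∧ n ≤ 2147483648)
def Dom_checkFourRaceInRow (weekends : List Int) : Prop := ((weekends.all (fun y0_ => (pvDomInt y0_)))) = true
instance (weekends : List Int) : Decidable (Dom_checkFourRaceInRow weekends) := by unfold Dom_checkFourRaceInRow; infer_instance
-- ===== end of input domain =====

-- B replaces A's running consecutive-count accumulator with a sliding window that tests the
-- three adjacent differences of each length-4 block directly (objective: alternative).

-- ===== PORT A =====
-- loop 'for i in range(1, len(weekends))' with the running counter; early return via recursion
def pvAGo (ws : List Int) (i : Nat) (count : Int) : Bool :=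
  if _h : i < ws.length then
    let c := if PySem.List.pyGetD ws (i : Int) 0 - PySem.List.pyGetD ws ((i : Int) - 1) 0 = 1
             then count + 1 else 1
    if c = 4 then true else pvAGo ws (i + 1) c
  else false
termination_by ws.length - i

def checkFourRaceInRow (weekends : List Int) : Bool := pvAGo weekends 1 1

-- ===== PORT B =====
-- loop 'for i in range(len(weekends) - 3)' testing the three diffs of window [i, i+3]
def pvBGo (ws : List Int) (i : Nat) : Bool :=
  if _h : i < ws.length - 3 then
    if PySem.List.pyGetD ws ((i : Int) + 1) 0 - PySem.List.pyGetD ws (i : Int) 0 = 1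
       ∧ PySem.List.pyGetD ws ((i : Int) + 2) 0 - PySem.List.pyGetD ws ((i : Int) + 1) 0 = 1
       ∧ PySem.List.pyGetD ws ((i : Int) + 3) 0 - PySem.List.pyGetD ws ((i : Int) + 2) 0 = 1
    then true else pvBGo ws (i + 1)
  else false
termination_by ws.length - 3 - i

def checkFourRaceInRow_alt (weekends : List Int) : Bool := pvBGo weekends 0

-- ===== PRECONDITION & SPEC =====
def Spec_checkFourRaceInRow (weekends : List Int) (out : Bool) : Prop := out = checkFourRaceInRow_alt weekends
instance (weekends : List Int) (out : Bool) : Decidable (Spec_checkFourRaceInRow weekends out) := by unfold Spec_checkFourRaceInRow; infer_instance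

-- ===== CLAIM (what is proved, stated in full; the proofs are below) =====
def Claim_equal_checkFourRaceInRow : Prop := ∀ (weekends : List Int), Dom_checkFourRaceInRow weekends → Spec_checkFourRaceInRow weekends (checkFourRaceInRow weekends)

-- ===== LEMMAS AND PROOFS =====

-- 'the step from weekend k to weekend k+1 is 1'
def pvW (ws : List Int) (k : Nat) : Prop :=
  PySem.List.pyGetD ws ((k : Int) + 1) 0 - PySem.List.pyGetD ws (k : Int) 0 = 1

lemma pvDiffA (ws : List Int) (i : Nat) (h : 1 ≤ i) :
    (PySem.List.pyGetD ws (i : Int) 0 - PySem.List.pyGetD ws ((i : Int) - 1) 0 = 1) ↔ pvW ws (i - 1) := by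
  unfold pvW
  have h1 : ((i - 1 : Nat) : Int) = (i : Int) - 1 := by omega
  rw [h1]
  have h2 : (i : Int) - 1 + 1 = (i : Int) := by ring
  rw [h2]

lemma pvAGo_iff (ws : List Int) :
    ∀ fuel i c, ws.length ≤ i + fuel → 1 ≤ c → c ≤ 3 → c ≤ (i : Int) →
    (∀ k, k + 2 ≤ i → (i : Int) ≤ k + c → pvW ws k) →
    (pvAGo ws i c = true ↔
      ∃ j : Nat, (i : Int) ≤ (j : Int) + c ∧ j + 4 ≤ ws.length ∧ pvW ws j ∧ pvW ws (j + 1) ∧ pvW ws (j + 2)) := by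
  intro fuel
  induction fuel with
  | zero =>
    intro i c hf h1 h3 hci _H
    rw [pvAGo]
    have hni : ¬ i < ws.length := by omega
    rw [dif_neg hni]
    simp only [Bool.false_eq_true, false_iff]
    rintro ⟨j, hjc, hj4, -⟩
    omega
  | succ f ih =>
    intro i c hf h1 h3 hci H
    rw [pvAGo]
    by_cases hi : i < ws.length
    · rw [dif_pos hi]
      have hi1 : 1 ≤ i := by omega
      by_cases hd : PySem.List.pyGetD ws (i : Int) 0 - PySem.List.pyGetD ws ((i : Int) - 1) 0 = 1
      · rw [if_pos hd]
        by_cases hc3 : c = 3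
        · subst hc3
          rw [if_pos (by norm_num : (3:Int) + 1 = 4)]
          simp only [true_iff]
          refine ⟨i - 3, by omega, by omega, ?_, ?_, ?_⟩
          · exact H (i - 3) (by omega) (by omega)
          · have := H (i - 3 + 1) (by omega) (by omega)
            simpa using this
          · have hw := (pvDiffA ws i hi1).mp hd
            have he : i - 3 + 2 = i - 1 := by omega
            rw [he]
            exact hw
        · have hc4 : ¬ (c + 1 = 4) := by omega
          rw [if_neg hc4]
          have H' : ∀ k, k + 2 ≤ i + 1 → ((i : Int) + 1) ≤ k + (c + 1) → pvW ws k := by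
            intro k hk2 hkc
            by_cases hk : k + 2 ≤ i
            · exact H k hk (by omega)
            · have hk1 : k = i - 1 := by omega
              subst hk1
              exact (pvDiffA ws i hi1).mp hd
          have := ih (i + 1) (c + 1) (by omega) (by omega) (by omega) (by push_cast; omega)
            (by push_cast at H' ⊢; exact H')
          rw [this]
          constructor <;> rintro ⟨j, hjc, hj4, hw⟩ <;>
            exact ⟨j, by push_cast at hjc ⊢; omega, hj4, hw⟩
      · rw [if_neg hd]
        rw [if_neg (by norm_num : ¬ ((1:Int) = 4))]
        have H' : ∀ k, k + 2 ≤ i + 1 → ((i : Int) + 1) ≤ k + 1 → pvW ws k := by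
          intro k _ hkc
          exfalso
          push_cast at hkc
          omega
        have := ih (i + 1) 1 (by omega) (by omega) (by omega) (by push_cast; omega)
          (by push_cast at H' ⊢; exact H')
        rw [this]
        constructor
        · rintro ⟨j, hjc, hj4, hw⟩
          exact ⟨j, by push_cast at hjc ⊢; omega, hj4, hw⟩
        · rintro ⟨j, hjc, hj4, hw0, hw1, hw2⟩
          refine ⟨j, ?_, hj4, hw0, hw1, hw2⟩
          push_cast at hjc ⊢
          by_contra hlt
          have hji : j ≤ i - 1 := by omega
          have hji3 : i - 1 ≤ j + 2 := by omega
          have hwi : pvW ws (i - 1) := by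
            rcases (by omega : i - 1 = j ∨ i - 1 = j + 1 ∨ i - 1 = j + 2) with h | h | h <;>
              rw [h] <;> assumption
          exact hd ((pvDiffA ws i hi1).mpr hwi)
    · rw [dif_neg hi]
      simp only [Bool.false_eq_true, false_iff]
      rintro ⟨j, hjc, hj4, -⟩
      omega

lemma pvBGo_iff (ws : List Int) :
    ∀ fuel i, ws.length - 3 ≤ i + fuel →
    (pvBGo ws i = true ↔
      ∃ j, i ≤ j ∧ j + 3 < ws.length ∧ pvW ws j ∧ pvW ws (j + 1) ∧ pvW ws (j + 2)) := by
  intro fuel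
  induction fuel with
  | zero =>
    intro i hf
    rw [pvBGo]
    have hni : ¬ i < ws.length - 3 := by omega
    rw [dif_neg hni]
    simp only [Bool.false_eq_true, false_iff]
    rintro ⟨j, hij, hj3, -⟩
    omega
  | succ f ih =>
    intro i hf
    rw [pvBGo]
    by_cases hi : i < ws.length - 3
    · rw [dif_pos hi]
      by_cases hw : PySem.List.pyGetD ws ((i : Int) + 1) 0 - PySem.List.pyGetD ws (i : Int) 0 = 1
          ∧ PySem.List.pyGetD ws ((i : Int) + 2) 0 - PySem.List.pyGetD ws ((i : Int) + 1) 0 = 1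
          ∧ PySem.List.pyGetD ws ((i : Int) + 3) 0 - PySem.List.pyGetD ws ((i : Int) + 2) 0 = 1
      · rw [if_pos hw]
        obtain ⟨h0, h1, h2⟩ := hw
        simp only [true_iff]
        refine ⟨i, le_refl i, by omega, ?_, ?_, ?_⟩ <;> unfold pvW <;> push_cast
        · exact h0
        · exact h1
        · exact h2
      · rw [if_neg hw]
        rw [ih (i + 1) (by omega)]
        constructor
        · rintro ⟨j, hij, hj3, hws⟩
          exact ⟨j, by omega, hj3, hws⟩
        · rintro ⟨j, hij, hj3, hw0, hw1, hw2⟩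
          refine ⟨j, ?_, hj3, hw0, hw1, hw2⟩
          rcases eq_or_ne j i with hji | hji
          · exfalso
            subst hji
            apply hw
            unfold pvW at hw0 hw1 hw2
            push_cast at hw0 hw1 hw2
            exact ⟨hw0, hw1, hw2⟩
          · omega
    · rw [dif_neg hi]
      simp only [Bool.false_eq_true, false_iff]
      rintro ⟨j, hij, hj3, -⟩
      omega

-- ===== VERDICT (by name: the statement is the Claim_ definition above) =====
theorem checkFourRaceInRow_spec : Claim_equal_checkFourRaceInRow := by
  intro ws _hDom
  unfold Spec_checkFourRaceInRow checkFourRaceInRow checkFourRaceInRow_alt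
  have hA := pvAGo_iff ws ws.length 1 1 (by omega) (by omega) (by omega) (by norm_num)
    (by intro k hk _; omega)
  have hB := pvBGo_iff ws ws.length 0 (by omega)
  have hPQ : (∃ j : Nat, ((1 : Nat) : Int) ≤ (j : Int) + 1 ∧ j + 4 ≤ ws.length ∧ pvW ws j ∧ pvW ws (j + 1) ∧ pvW ws (j + 2)) ↔
      (∃ j, 0 ≤ j ∧ j + 3 < ws.length ∧ pvW ws j ∧ pvW ws (j + 1) ∧ pvW ws (j + 2)) := by
    constructor <;> rintro ⟨j, h1, h2, hw⟩ <;> exact ⟨j, by omega, by omega, hw⟩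
  have : pvAGo ws 1 1 = true ↔ pvBGo ws 0 = true := by
    rw [hA, hB]
    exact hPQ
  exact Bool.eq_iff_iff.mpr this
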